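-- pv_equiv track=rewrite | github.com/TharunTulla2001/PythonCoding | PythonCoding/Problems/4. Write a Python program to convert a pair of values into a sorted unique array..py | sorted_unique_array
-- ===== SOURCE A (Python) =====
-- def sorted_unique_array(list_1, list_2):
--     combined_list = list_1 + list_2
--     unique_list = []
--     for item in combined_list:
--         if item not in unique_list:
--             unique_list.append(item)
--     unique_list.sort()
--     return unique_list
-- ===== SOURCE B (Python) =====
-- def sorted_unique_array(list_1, list_2):
--     result = []
--     for item in sorted(list_1 + list_2):
--         if not result or item != result[-1]:
--             result.append(item)
--     return result
-- ===== Notes on version B (the rewrite author's own statement) =====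
-- stated objective: faster
-- what changed: B sorts the concatenation first and then removes duplicates in one adjacent-run pass, instead of A's quadratic membership-scan dedup followed by a sort.
import Mathlib
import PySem

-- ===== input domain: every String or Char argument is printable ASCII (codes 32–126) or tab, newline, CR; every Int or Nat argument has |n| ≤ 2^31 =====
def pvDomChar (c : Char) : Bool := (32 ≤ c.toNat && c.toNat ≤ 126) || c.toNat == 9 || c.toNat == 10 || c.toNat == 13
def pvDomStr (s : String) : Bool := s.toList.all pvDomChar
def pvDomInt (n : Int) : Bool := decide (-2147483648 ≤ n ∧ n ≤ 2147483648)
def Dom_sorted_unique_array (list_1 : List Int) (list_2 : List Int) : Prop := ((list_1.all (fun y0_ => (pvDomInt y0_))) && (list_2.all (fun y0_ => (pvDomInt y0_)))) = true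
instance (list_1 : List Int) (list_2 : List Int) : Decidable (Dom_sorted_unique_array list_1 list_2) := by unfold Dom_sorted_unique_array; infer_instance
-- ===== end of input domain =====

-- B sorts the concatenation first, then drops adjacent duplicates in one pass (faster: avoids A's quadratic membership-scan dedup).

-- ===== PORT A =====
-- combined = list_1 + list_2; unique = []; for item in combined: if item not in unique: unique.append(item); unique.sort()
def sorted_unique_array (list_1 : List Int) (list_2 : List Int) : List Int :=
  let combined_list := list_1 ++ list_2
  let unique_list :=
    combined_list.foldl (fun acc item => if item ∈ acc then acc else acc ++ [item]) []
  PySem.List.sorted unique_list (fun x => x) false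

-- ===== PORT B =====
-- result = []; for item in sorted(list_1 + list_2): if not result or item != result[-1]: result.append(item)
def sorted_unique_array_alt (list_1 : List Int) (list_2 : List Int) : List Int :=
  (PySem.List.sorted (list_1 ++ list_2) (fun x => x) false).foldl
    (fun result item =>
      if result = [] ∨ PySem.List.pyGet? result (-1) ≠ some item then result ++ [item]
      else result) []

-- ===== PRECONDITION & SPEC =====
def Spec_sorted_unique_array (list_1 : List Int) (list_2 : List Int) (out : List Int) : Prop := out = sorted_unique_array_alt list_1 list_2
instance (list_1 : List Int) (list_2 : List Int) (out : List Int) : Decidable (Spec_sorted_unique_array list_1 list_2 out) := by unfold Spec_sorted_unique_array; infer_instance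

-- ===== CLAIM (what is proved, stated in full; the proofs are below) =====
def Claim_equal_sorted_unique_array : Prop := ∀ (list_1 : List Int) (list_2 : List Int), Dom_sorted_unique_array list_1 list_2 → Spec_sorted_unique_array list_1 list_2 (sorted_unique_array list_1 list_2)

-- ===== LEMMAS AND PROOFS =====

-- A's dedup loop: membership characterisation
theorem mem_uniqFold (l : List Int) : ∀ (acc : List Int) (x : Int),
    x ∈ l.foldl (fun acc item => if item ∈ acc then acc else acc ++ [item]) acc ↔ x ∈ acc ∨ x ∈ l := by
  induction l with
  | nil => simp
  | cons a t ih =>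
    intro acc x
    simp only [List.foldl_cons]
    by_cases h : a ∈ acc
    · simp only [if_pos h, ih]
      constructor
      · rintro (hx | hx) <;> simp_all
      · rintro (hx | hx)
        · exact Or.inl hx
        · rcases List.mem_cons.mp hx with rfl | hx
          · exact Or.inl h
          · exact Or.inr hx
    · simp only [if_neg h, ih, List.mem_append, List.mem_cons]
      tauto

-- A's dedup loop: no duplicates
theorem nodup_uniqFold (l : List Int) : ∀ (acc : List Int), acc.Nodup →
    (l.foldl (fun acc item => if item ∈ acc then acc else acc ++ [item]) acc).Nodup := by
  induction l with
  | nil => intro acc h; simpa using h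
  | cons a t ih =>
    intro acc h
    simp only [List.foldl_cons]
    by_cases ha : a ∈ acc
    · simp only [if_pos ha]; exact ih acc h
    · simp only [if_neg ha]
      refine ih _ ?_
      rw [List.nodup_append]
      refine ⟨h, List.nodup_singleton a, ?_⟩
      intro x hx y hy
      simp only [List.mem_singleton] at hy
      subst hy
      exact fun hxy => ha (hxy ▸ hx)

-- last element of a strictly increasing list bounds every element
theorem le_getLast_of_pairwise_lt : ∀ (acc : List Int) (m : Int), acc.Pairwise (· < ·) →
    acc.getLast? = some m → ∀ a ∈ acc, a ≤ m := by
  intro acc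
  induction acc with
  | nil => simp
  | cons b t ih =>
    intro m hp hm a ha
    cases t with
    | nil =>
      simp_all
    | cons c u =>
      have hm' : (c :: u).getLast? = some m := by
        simpa [List.getLast?_cons_cons] using hm
      have hp' : (c :: u).Pairwise (· < ·) := hp.of_cons
      rcases List.mem_cons.mp ha with rfl | ha'
      · have hmmem : m ∈ c :: u := List.mem_of_getLast? hm'
        have : a < m := (List.pairwise_cons.mp hp).1 m hmmem
        exact le_of_lt this
      · exact ih m hp' hm' a ha'

-- result[-1] on a nonempty list is its last element
theorem pyGet_neg_one (acc : List Int) (h : acc ≠ []) :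
    PySem.List.pyGet? acc (-1) = acc.getLast? := by
  cases acc with
  | nil => simp_all
  | cons b t =>
    simp [PySem.List.pyGet?, PySem.List.pyIdx?, List.getLast?_eq_getElem?]

-- B's adjacent-dedup pass: on a ≤-sorted input, it produces a strictly increasing
-- list with exactly the elements of acc ∪ input
theorem adjDedup_invariant (s : List Int) : ∀ (acc : List Int),
    s.Pairwise (· ≤ ·) → acc.Pairwise (· < ·) → (∀ a ∈ acc, ∀ b ∈ s, a ≤ b) →
    (s.foldl (fun result item =>
        if result = [] ∨ PySem.List.pyGet? result (-1) ≠ some item then result ++ [item]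
        else result) acc).Pairwise (· < ·) ∧
    (∀ x, x ∈ s.foldl (fun result item =>
        if result = [] ∨ PySem.List.pyGet? result (-1) ≠ some item then result ++ [item]
        else result) acc ↔ x ∈ acc ∨ x ∈ s) := by
  induction s with
  | nil => intro acc _ hacc _; simpa using hacc
  | cons a t ih =>
    intro acc hs hacc hle
    have hs' : t.Pairwise (· ≤ ·) := hs.of_cons
    have hat : ∀ b ∈ t, a ≤ b := (List.pairwise_cons.mp hs).1
    simp only [List.foldl_cons]
    by_cases hcond : acc = [] ∨ PySem.List.pyGet? acc (-1) ≠ some a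
    · rw [if_pos hcond]
      have hacc' : (acc ++ [a]).Pairwise (· < ·) := by
        rcases hcond with rfl | hne
        · simpa using hacc
        · by_cases hnil : acc = []
          · subst hnil; simpa using hacc
          · obtain ⟨m, hm⟩ := List.getLast?_isSome.mpr hnil |> Option.isSome_iff_exists.mp
            have hma' : m ≤ a := hle m (List.mem_of_getLast? hm) a (by simp)
            have hmne : m ≠ a := by
              intro h; apply hne; rw [pyGet_neg_one acc hnil, hm, h]
            have hmlt : m < a := lt_of_le_of_ne hma' hmne
            rw [List.pairwise_append]
            refine ⟨hacc, by simp, ?_⟩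
            intro x hx y hy
            simp only [List.mem_singleton] at hy; subst hy
            have hxm : x ≤ m := le_getLast_of_pairwise_lt acc m hacc hm x hx
            exact lt_of_le_of_lt hxm hmlt
      have hle' : ∀ u ∈ acc ++ [a], ∀ b ∈ t, u ≤ b := by
        intro u hu b hb
        rcases List.mem_append.mp hu with hu | hu
        · exact hle u hu b (by simp [hb])
        · simp only [List.mem_singleton] at hu; subst hu; exact hat b hb
      obtain ⟨h1, h2⟩ := ih (acc ++ [a]) hs' hacc' hle'
      refine ⟨h1, fun x => ?_⟩
      rw [h2]; simp; tauto
    · rw [if_neg hcond]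
      rw [not_or, not_not] at hcond
      obtain ⟨hnil, hlast⟩ := hcond
      have hamem : a ∈ acc := by
        have := pyGet_neg_one acc hnil
        rw [this] at hlast
        exact List.mem_of_getLast? hlast
      have hle' : ∀ u ∈ acc, ∀ b ∈ t, u ≤ b := fun u hu b hb => hle u hu b (by simp [hb])
      obtain ⟨h1, h2⟩ := ih acc hs' hacc hle'
      refine ⟨h1, fun x => ?_⟩
      rw [h2]
      constructor
      · rintro (h | h) <;> tauto
      · rintro (h | h)
        · exact Or.inl h
        · rcases List.mem_cons.mp h with rfl | h
          · exact Or.inl hamem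
          · exact Or.inr h

theorem sorted_unique_eq (list_1 list_2 : List Int) :
    sorted_unique_array list_1 list_2 = sorted_unique_array_alt list_1 list_2 := by
  unfold sorted_unique_array sorted_unique_array_alt
  set c := list_1 ++ list_2 with hc
  set uniq := c.foldl (fun acc item => if item ∈ acc then acc else acc ++ [item]) [] with huniq
  set s := PySem.List.sorted c (fun x => x) false with hsrt
  have hs_pair : s.Pairwise (· ≤ ·) := by
    simpa using PySem.List.sorted_pairwise (xs := c) (key := fun x => x)
  obtain ⟨hys_pair, hys_mem⟩ := adjDedup_invariant s [] hs_pair (by simp) (by simp)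
  set ys := s.foldl (fun result item =>
      if result = [] ∨ PySem.List.pyGet? result (-1) ≠ some item then result ++ [item]
      else result) [] with hys
  have hys_nodup : ys.Nodup := hys_pair.imp (fun h => ne_of_lt h)
  have huniq_nodup : uniq.Nodup := nodup_uniqFold c [] (by simp)
  have hmem_s : ∀ x : Int, x ∈ s ↔ x ∈ c := fun x => PySem.List.mem_sorted c (fun x => x) false x
  have hmem_uniq : ∀ x : Int, x ∈ uniq ↔ x ∈ c := fun x => by
    rw [huniq, mem_uniqFold]; simp
  have hperm : ys.Perm uniq := by
    rw [List.perm_ext_iff_of_nodup hys_nodup huniq_nodup]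
    intro x
    rw [hmem_uniq x, ← hmem_s x]
    have := hys_mem x
    simp only [List.not_mem_nil, false_or] at this
    exact this
  exact PySem.List.sorted_eq_of_perm_of_pairwise_lt uniq ys (fun x => x) hperm (by simpa using hys_pair)

-- ===== VERDICT (by name: the statement is the Claim_ definition above) =====
theorem sorted_unique_array_spec : Claim_equal_sorted_unique_array := by
  intro list_1 list_2 _
  unfold Spec_sorted_unique_array
  exact sorted_unique_eq list_1 list_2
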